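-- pv_equiv track=rewrite | github.com/Hidenver2016/Leetcode | Python3.6/387-Py3-First-Unique-Character-in-a-String.py | solution
-- ===== SOURCE A (Python) =====
-- def solution(nums):
-- # 注意 本来是len(nums)-1,  但是range本来只到len(nums)-1, 所以直接写成range(len(nums))
-- # 但是考虑到对于最后一个字母，不可能再和之后的比较了，所以直接把字长取在len(nums)-1,比较到倒数第二个为止
--     for i in range(len(nums)-1):
--         sign = 0
--         for j in range(i+1, len(nums)):# 必须是和之后的比较所以是i+1
--             if nums[i] == nums[j]:
--                 sign += 1
--         if sign == 0:
--             return i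
--
--     return -1
-- ===== SOURCE B (Python) =====
-- def solution(nums):
--     # One backward pass: keep the set of characters seen strictly to the right;
--     # an index i < len(nums)-1 qualifies iff its char is not in that set.
--     seen = set()
--     res = -1
--     n = len(nums)
--     for i in range(n - 1, -1, -1):
--         c = nums[i]
--         if i < n - 1 and c not in seen:
--             res = i
--         seen.add(c)
--     return res
-- ===== Notes on version B (the rewrite author's own statement) =====
-- stated objective: faster
-- what changed: Replaces A's nested forward scan (for each i, rescan the whole suffix counting matches) with a single backward pass that maintains a set of characters already seen to the right, overwriting the result so the smallest qualifying index survives.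
import Mathlib
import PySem

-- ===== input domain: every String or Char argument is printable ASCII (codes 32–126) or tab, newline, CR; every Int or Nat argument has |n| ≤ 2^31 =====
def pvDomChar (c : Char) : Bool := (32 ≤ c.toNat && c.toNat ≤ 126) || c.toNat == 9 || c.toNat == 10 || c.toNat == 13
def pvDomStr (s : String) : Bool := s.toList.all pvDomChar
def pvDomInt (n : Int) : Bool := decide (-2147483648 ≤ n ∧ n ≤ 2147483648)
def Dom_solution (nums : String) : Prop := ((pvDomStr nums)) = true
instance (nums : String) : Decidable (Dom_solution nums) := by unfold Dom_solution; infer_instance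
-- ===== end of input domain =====

-- B replaces A's nested suffix rescans with one backward pass keeping a set of chars seen to the right (measured faster).

-- ===== PORT A =====
-- inner loop: sign = number of j in [i+1, n) with nums[i] == nums[j]
def solutionSign (l : List Char) (n i : Int) : Int :=
  (PySem.List.pyRange (i + 1) n 1).foldl
    (fun sign j =>
      if PySem.List.pyGetD l i ' ' = PySem.List.pyGetD l j ' ' then sign + 1 else sign) 0

-- outer loop over i in range(len(nums)-1), returning the first i with sign = 0
def solutionLoop (l : List Char) (n : Int) : List Int → Int
  | [] => -1
  | i :: rest => if solutionSign l n i = 0 then i else solutionLoop l n rest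

def solution (nums : String) : Int :=
  let l := nums.toList
  let n : Int := l.length
  solutionLoop l n (PySem.List.pyRange 0 (n - 1) 1)

-- ===== PORT B =====
-- one backward pass i = n-1 .. 0 with state (res, seen): res := i when i < n-1 and nums[i] not yet seen
def solution_alt (nums : String) : Int :=
  let l := nums.toList
  let n : Int := l.length
  ((PySem.List.pyRange (n - 1) (-1) (-1)).foldl
    (fun (st : Int × PySem.Set Char) i =>
      let c := PySem.List.pyGetD l i ' '
      ((if i < n - 1 ∧ ¬ (PySem.Set.contains st.2 c = true) then i else st.1),
        PySem.Set.add st.2 c))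
    (-1, PySem.Set.empty)).1

-- ===== PRECONDITION & SPEC =====
def Spec_solution (nums : String) (out : Int) : Prop := out = solution_alt nums
instance (nums : String) (out : Int) : Decidable (Spec_solution nums out) := by unfold Spec_solution; infer_instance

-- ===== CLAIM (what is proved, stated in full; the proofs are below) =====
def Claim_equal_solution : Prop := ∀ (nums : String), Dom_solution nums → Spec_solution nums (solution nums)

-- ===== LEMMAS AND PROOFS =====

-- reference function: with fuel = n-1-i, first index ≥ i (and < n-1) whose char does not reoccur later, else -1
def firstFrom (l : List Char) : Nat → Nat → Int
  | 0, _ => -1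
  | fuel + 1, i =>
      if (l.drop (i + 1)).contains (l.getD i ' ') then firstFrom l fuel (i + 1) else (i : Int)

lemma solutionSign_eq_zero (l : List Char) (i : Nat) :
    solutionSign l (l.length : Int) (i : Int) = 0 ↔
      (l.drop (i + 1)).contains (l.getD i ' ') = false := by
  unfold solutionSign
  simp only [PySem.List.pyGetD_natCast]
  rw [show ((i:Int) + 1) = ((i + 1 : Nat) : Int) by push_cast; ring]
  rw [PySem.List.foldl_pyRange_pyGetD' l ' '
        (fun acc x => if l.getD i ' ' = x then acc + 1 else acc) 0 (by omega)]
  have hcnt : (l.drop ((i + 1 : Nat) : Int).toNat).foldl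
      (fun acc x => if l.getD i ' ' = x then acc + 1 else acc) 0
        = 0 + ((l.drop (i + 1)).countP (fun x => l.getD i ' ' == x) : Int) := by
    rw [← PySem.List.foldl_count_if (fun x => l.getD i ' ' == x) (l.drop (i + 1)) 0]
    simp [beq_iff_eq]
  rw [hcnt]
  simp only [zero_add, Int.natCast_eq_zero, List.countP_eq_zero, List.contains_eq_mem,
    decide_eq_false_iff_not, beq_iff_eq]
  constructor
  · intro h hm
    exact h _ hm rfl
  · intro h a hm he
    exact h (he ▸ hm)

lemma lemA (l : List Char) : ∀ (fuel i : Nat), ((l.length : Int) - 1 - i).toNat = fuel →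
    solutionLoop l (l.length : Int) (PySem.List.pyRange (i : Int) ((l.length : Int) - 1) 1) =
      firstFrom l fuel i := by
  intro fuel
  induction fuel with
  | zero =>
    intro i h
    have : ((l.length : Int) - 1) ≤ (i : Int) := by omega
    rw [PySem.List.pyRange_one_eq_nil this]
    rfl
  | succ fuel ih =>
    intro i h
    have hlt : (i : Int) < (l.length : Int) - 1 := by omega
    rw [PySem.List.pyRange_one_cons hlt]
    show (if solutionSign l (l.length : Int) (i : Int) = 0 then (i : Int)
          else solutionLoop l (l.length : Int)
            (PySem.List.pyRange ((i : Int) + 1) ((l.length : Int) - 1) 1)) = _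
    rw [show ((i:Int) + 1) = ((i + 1 : Nat) : Int) by push_cast; ring]
    rw [ih (i + 1) (by omega)]
    have hF : firstFrom l (fuel + 1) i
        = if (l.drop (i + 1)).contains (l.getD i ' ') then firstFrom l fuel (i + 1)
          else (i : Int) := rfl
    rw [hF]
    by_cases hc : (l.drop (i + 1)).contains (l.getD i ' ') = true
    · have hs : ¬ (solutionSign l (l.length : Int) (i : Int) = 0) := by
        intro h0
        have hf := (solutionSign_eq_zero l i).mp h0
        rw [hc] at hf
        exact absurd hf (by decide)
      rw [if_pos hc, if_neg hs]
    · have hc' : (l.drop (i + 1)).contains (l.getD i ' ') = false := by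
        simpa using hc
      rw [if_pos ((solutionSign_eq_zero l i).mpr hc'),
        if_neg (show ¬ ((l.drop (i + 1)).contains (l.getD i ' ') = true) by
          rw [hc']; exact (by decide))]

def bStep (l : List Char) (st : Int × PySem.Set Char) (i : Int) : Int × PySem.Set Char :=
  let c := PySem.List.pyGetD l i ' '
  ((if i < (l.length : Int) - 1 ∧ ¬ (PySem.Set.contains st.2 c = true) then i else st.1),
    PySem.Set.add st.2 c)

def bState (l : List Char) (i : Nat) : Int × PySem.Set Char :=
  (PySem.List.pyRange ((l.length : Int) - 1) ((i : Int) - 1) (-1)).foldl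
    (bStep l) (-1, PySem.Set.empty)

lemma lemB (l : List Char) : ∀ (fuel i : Nat), ((l.length : Int) - i).toNat = fuel →
    (bState l i).1 = firstFrom l (l.length - 1 - i) i ∧
    (∀ c, c ∈ (bState l i).2 ↔ c ∈ l.drop i) := by
  intro fuel
  induction fuel with
  | zero =>
    intro i h
    have hle : l.length ≤ i := by omega
    have hnil : bState l i = (-1, PySem.Set.empty) := by
      unfold bState
      rw [PySem.List.pyRange_neg_one_eq_nil (by omega)]
      rfl
    rw [hnil]
    constructor
    · have : l.length - 1 - i = 0 := by omega
      rw [this]; rfl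
    · intro c
      rw [List.drop_eq_nil_of_le hle]
      simp [PySem.Set.empty]
  | succ fuel ih =>
    intro i h
    have hi : i < l.length := by omega
    have hsplit : bState l i = bStep l (bState l (i + 1)) (i : Int) := by
      unfold bState
      have e1 : PySem.List.pyRange ((l.length : Int) - 1) ((i : Int) - 1) (-1)
          = (PySem.List.pyRange (i : Int) (l.length : Int) 1).reverse := by
        rw [PySem.List.pyRange_neg_one_eq_reverse]
        rw [show ((i : Int) - 1) + 1 = (i : Int) from by ring,
          show ((l.length : Int) - 1) + 1 = (l.length : Int) from by ring]
      have e2 : PySem.List.pyRange ((l.length : Int) - 1) (((i + 1 : Nat) : Int) - 1) (-1)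
          = (PySem.List.pyRange ((i : Int) + 1) (l.length : Int) 1).reverse := by
        rw [PySem.List.pyRange_neg_one_eq_reverse]
        rw [show (((i + 1 : Nat) : Int) - 1) + 1 = (i : Int) + 1 from by push_cast; ring,
          show ((l.length : Int) - 1) + 1 = (l.length : Int) from by ring]
      rw [e1, e2, PySem.List.pyRange_one_cons (by omega : (i : Int) < (l.length : Int))]
      rw [List.reverse_cons, List.foldl_append]
      rfl
    obtain ⟨ih1, ih2⟩ := ih (i + 1) (by omega)
    have hgd : PySem.List.pyGetD l (i : Int) ' ' = l.getD i ' ' := PySem.List.pyGetD_natCast l i ' '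
    have hgetD : l.getD i ' ' = l[i] := List.getD_eq_getElem l ' ' hi
    have hdrop : l.drop i = l[i] :: l.drop (i + 1) := List.drop_eq_getElem_cons hi
    constructor
    · rw [hsplit]
      show (if (i : Int) < (l.length : Int) - 1 ∧
              ¬ (PySem.Set.contains (bState l (i+1)).2 (PySem.List.pyGetD l (i : Int) ' ') = true)
            then (i : Int) else (bState l (i+1)).1) = _
      by_cases hend : i < l.length - 1
      · have hfuel : l.length - 1 - i = (l.length - 1 - (i + 1)) + 1 := by omega
        rw [hfuel]
        have hF : firstFrom l ((l.length - 1 - (i + 1)) + 1) i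
            = if (l.drop (i + 1)).contains (l.getD i ' ')
              then firstFrom l (l.length - 1 - (i + 1)) (i + 1) else (i : Int) := rfl
        rw [hF]
        by_cases hm : l[i] ∈ l.drop (i + 1)
        · have hcont : PySem.Set.contains (bState l (i+1)).2 (PySem.List.pyGetD l (i : Int) ' ') = true := by
            rw [PySem.Set.contains_iff, hgd, hgetD, ih2]
            exact hm
          have hcL : (l.drop (i + 1)).contains (l.getD i ' ') = true := by
            rw [hgetD, List.contains_eq_mem]
            exact decide_eq_true hm
          rw [if_neg (fun hcond => hcond.2 hcont), if_pos hcL, ih1]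
        · have hcont : ¬ (PySem.Set.contains (bState l (i+1)).2 (PySem.List.pyGetD l (i : Int) ' ') = true) := by
            rw [PySem.Set.contains_iff, hgd, hgetD, ih2]
            exact hm
          have hcL : ¬ ((l.drop (i + 1)).contains (l.getD i ' ') = true) := by
            rw [hgetD, List.contains_eq_mem]
            simp [hm]
          rw [if_pos ⟨by omega, hcont⟩, if_neg hcL]
      · rw [if_neg (by rintro ⟨h1, -⟩; omega), ih1]
        have h1 : l.length - 1 - (i + 1) = 0 := by omega
        have h2 : l.length - 1 - i = 0 := by omega
        rw [h1, h2]
        rfl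
    · intro c
      rw [hsplit]
      show c ∈ PySem.Set.add (bState l (i+1)).2 (PySem.List.pyGetD l (i : Int) ' ') ↔ _
      simp only [PySem.Set.mem_add, hgd, hgetD, ih2, hdrop, List.mem_cons]
      tauto

-- ===== VERDICT (by name: the statement is the Claim_ definition above) =====
theorem solution_spec : Claim_equal_solution := by
  intro nums _
  unfold Spec_solution solution solution_alt
  show solutionLoop nums.toList (nums.toList.length : Int)
      (PySem.List.pyRange 0 ((nums.toList.length : Int) - 1) 1)
    = ((PySem.List.pyRange ((nums.toList.length : Int) - 1) (-1) (-1)).foldl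
        (bStep nums.toList) (-1, PySem.Set.empty)).1
  have hA := lemA nums.toList ((nums.toList.length : Int) - 1 - (0:Nat)).toNat 0 rfl
  have hB := (lemB nums.toList ((nums.toList.length : Int) - (0:Nat)).toNat 0 rfl).1
  unfold bState at hB
  simp only [Nat.cast_zero, sub_zero, zero_sub, Nat.sub_zero] at hA hB
  have hfuel : ((nums.toList.length : Int) - 1).toNat = nums.toList.length - 1 := by omega
  rw [hfuel] at hA
  rw [hA]
  exact hB.symm
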